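-- pv_equiv track=rewrite | github.com/Mingxue-Xu/toggle | src/plugins/compression/tensorizer.py | list_sizes
-- ===== SOURCE A (Python) =====
-- import itertools
-- from typing import List, Dict, Any, Optional, Union, Tuple, Set
--
-- def list_sizes(length: int = 768, min_length: int = 3, max_length: int = 4) -> List[Tuple]:
--     """
--     List possible tensor size factorizations for a given length
--
--     Migrated from original Tensorizer.list_sizes static method
--
--     Args:
--         length: Total number of elements
--         min_length: Minimum number of factors
--         max_length: Maximum number of factors (-1 for no limit)
--
--     Returns:
--         List of possible factorizations as tuples
--     """
--     def find_factors(n: int) -> List[int]: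
--         """Find factors of n"""
--         factors = set()
--         for i in range(1, int(n ** 0.5) + 1):
--             if n % i == 0:
--                 factors.add(i)
--                 factors.add(n // i)
--         # Remove 1 and the number itself to avoid trivial factorizations
--         factors = [element for element in factors if element not in [1, length]]
--         return sorted(factors)
--
--     def find_combinations_with_repetition(factors: List[int], target: int,
--                                         min_length: int = min_length,
--                                         max_length: int = max_length) -> Set[Tuple]:
--         """Find combinations of factors that multiply to target"""
--         result = set()
--
--         if max_length == -1:
--             max_length = len(factors) + 1
--
--         for r in range(min_length, max_length + 1):
--             for combo in itertools.product(factors, repeat=r):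
--                 if evaluate_combo(combo, target):
--                     result.add(tuple(sorted(combo)))  # Sort to avoid duplicates
--         return result
--
--     def evaluate_combo(combo: Tuple, gt: int) -> bool:
--         """Check if combination multiplies to ground truth"""
--         prod = 1
--         for number in combo:
--             prod *= number
--             if prod > gt:
--                 return False
--         return prod == gt
--
--     # Find factors and combinations
--     factors = find_factors(n=length)
--     combinations_of_factors = sorted(find_combinations_with_repetition(factors, target=length))
--
--     return combinations_of_factors
-- ===== SOURCE B (Python) =====
-- def list_sizes(length: int = 768, min_length: int = 3, max_length: int = 4):
--     """DFS over non-decreasing divisor chains of the remaining quotient,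
--     instead of brute-forcing every r-tuple of factors; emits in sorted order."""
--     divs = set()
--     for i in range(1, int(length ** 0.5) + 1):
--         if length % i == 0:
--             divs.add(i)
--             divs.add(length // i)
--     divs = sorted(d for d in divs if d not in (1, length))
--     max_len = len(divs) + 1 if max_length == -1 else max_length
--
--     def go(prefix, suffix, remaining):
--         # chains prefix+ext with prod(ext) == remaining, ext non-decreasing,
--         # drawn with repetition from the sorted suffix; lexicographic order
--         if remaining == 1:
--             return [prefix] if min_length <= len(prefix) <= max_len else []
--         out = []
--         if len(prefix) < max_len:
--             while suffix:
--                 d = suffix[0]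
--                 if remaining % d == 0:
--                     out += go(prefix + (d,), suffix, remaining // d)
--                 suffix = suffix[1:]
--         return out
--
--     return go((), divs, length)
-- ===== Notes on version B (the rewrite author's own statement) =====
-- stated objective: faster
-- what changed: A tries every r-tuple from the factor list for each r up to max_length and dedups sorted tuples through a set; B recursively extends a non-decreasing chain only by divisors of the remaining quotient, so it enumerates exactly the valid factorizations, already deduplicated and in sorted order with no final sort.
import Mathlib
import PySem

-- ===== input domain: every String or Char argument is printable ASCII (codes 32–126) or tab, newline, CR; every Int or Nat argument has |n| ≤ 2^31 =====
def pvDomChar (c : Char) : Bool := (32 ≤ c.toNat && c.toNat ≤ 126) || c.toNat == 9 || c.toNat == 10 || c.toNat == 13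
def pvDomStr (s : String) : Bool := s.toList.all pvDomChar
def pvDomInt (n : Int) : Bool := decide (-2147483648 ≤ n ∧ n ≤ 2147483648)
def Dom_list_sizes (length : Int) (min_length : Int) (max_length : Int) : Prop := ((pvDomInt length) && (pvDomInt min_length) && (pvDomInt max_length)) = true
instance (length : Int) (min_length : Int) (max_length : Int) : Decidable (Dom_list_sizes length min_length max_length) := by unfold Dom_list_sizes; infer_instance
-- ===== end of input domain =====

-- B replaces A's brute force over all r-tuples of factors by a DFS over non-decreasing
-- divisor chains of the remaining quotient, emitted directly in sorted order (objective: faster).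

-- ===== PORT A =====
-- int(n ** 0.5) is ported as Nat.sqrt: exact for 0 ≤ n ≤ 2^31 (the Dom bound);
-- a negative n raises TypeError in Python and is excluded by Pre_.
def pyFindFactors (length : Int) : List Int :=
  let factors : PySem.Set Int :=
    (PySem.List.pyRange 1 ((Nat.sqrt length.toNat : Int) + 1) 1).foldl
      (fun s i =>
        if PySem.Int.mod length i == 0 then
          PySem.Set.add (PySem.Set.add s i) (PySem.Int.floordiv length i)
        else s)
      PySem.Set.empty
  -- the comprehension iterates a set, but the result is sorted, so it is order-independent
  PySem.List.sorted (factors.filter (fun e => !(e == 1 || e == length))) (fun x => x) false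

def pyEvaluateCombo : List Int → Int → Int → Bool
  | [], gt, prod => prod == gt
  | n :: rest, gt, prod =>
    let prod := prod * n
    if prod > gt then false else pyEvaluateCombo rest gt prod

-- itertools.product(factors, repeat=r), in CPython's order (leftmost varies slowest)
def pyProductRepeat (factors : List Int) : Nat → List (List Int)
  | 0 => [[]]
  | r + 1 => factors.flatMap (fun a => (pyProductRepeat factors r).map (a :: ·))

-- itertools.product with a negative repeat raises ValueError; Pre_ keeps every r of the
-- range loop nonnegative, so 'r.toNat' is exact on the admitted inputs
def pyFindCombinations (factors : List Int) (target : Int) (min_length : Int) (max_length : Int) :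
    PySem.Set (List Int) :=
  let maxL : Int := if max_length == -1 then (factors.length : Int) + 1 else max_length
  (PySem.List.pyRange min_length (maxL + 1) 1).foldl
    (fun result r =>
      (pyProductRepeat factors r.toNat).foldl
        (fun result combo =>
          if pyEvaluateCombo combo target 1 then
            PySem.Set.add result (PySem.List.sorted combo (fun x => x) false)
          else result)
        result)
    PySem.Set.empty

def list_sizes (length : Int) (min_length : Int) (max_length : Int) : List (List Int) :=
  let factors := pyFindFactors length
  PySem.List.sorted (pyFindCombinations factors length min_length max_length) (fun x => x) false

-- ===== PORT B =====
def altDivisors (length : Int) : List Int :=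
  let divs : PySem.Set Int :=
    (PySem.List.pyRange 1 ((Nat.sqrt length.toNat : Int) + 1) 1).foldl
      (fun s i =>
        if PySem.Int.mod length i == 0 then
          PySem.Set.add (PySem.Set.add s i) (PySem.Int.floordiv length i)
        else s)
      PySem.Set.empty
  PySem.List.sorted (divs.filter (fun d => !(d == 1 || d == length))) (fun x => x) false

-- go, and its while-loop over the shrinking suffix; the fuel argument only makes the
-- recursion structural (it is never exhausted on the inputs list_sizes_alt passes in)
mutual
def altGo (minL maxL : Int) (fuel : Nat) (pre : List Int) (suffix : List Int) (remaining : Int) :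
    List (List Int) :=
  if remaining == 1 then
    if minL ≤ (pre.length : Int) ∧ (pre.length : Int) ≤ maxL then [pre] else []
  else
    match fuel with
    | 0 => []
    | fuel' + 1 =>
      if (pre.length : Int) < maxL then altLoop minL maxL fuel' pre suffix remaining
      else []
termination_by (fuel, 0)

def altLoop (minL maxL : Int) (fuel : Nat) (pre : List Int) (suffix : List Int) (remaining : Int) :
    List (List Int) :=
  match suffix with
  | [] => []
  | d :: rest =>
    (if PySem.Int.mod remaining d == 0 then
       altGo minL maxL fuel (pre ++ [d]) (d :: rest) (PySem.Int.floordiv remaining d)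
     else []) ++ altLoop minL maxL fuel pre rest remaining
termination_by (fuel, suffix.length + 1)
end

def list_sizes_alt (length : Int) (min_length : Int) (max_length : Int) : List (List Int) :=
  let divs := altDivisors length
  let maxL : Int := if max_length == -1 then (divs.length : Int) + 1 else max_length
  altGo min_length maxL (length.toNat + divs.length + 2) [] divs length

-- ===== PRECONDITION & SPEC =====
-- Pre_ excludes exactly the inputs where A raises: a negative length (** 0.5 on a negative int
-- yields a complex number, so int() raises TypeError), and a negative min_length whose range
-- loop is nonempty (itertools.product(…, repeat=r) with r < 0 raises ValueError).
def Pre_list_sizes (length : Int) (min_length : Int) (max_length : Int) : Prop :=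
  0 ≤ length ∧ (0 ≤ min_length ∨ (max_length ≠ -1 ∧ max_length < min_length))
instance (length : Int) (min_length : Int) (max_length : Int) : Decidable (Pre_list_sizes length min_length max_length) := by unfold Pre_list_sizes; infer_instance

def pvWitness_list_sizes : Int × Int × Int := (12, 2, 3)

def Spec_list_sizes (length : Int) (min_length : Int) (max_length : Int) (out : List (List Int)) : Prop := out = list_sizes_alt length min_length max_length
instance (length : Int) (min_length : Int) (max_length : Int) (out : List (List Int)) : Decidable (Spec_list_sizes length min_length max_length out) := by unfold Spec_list_sizes; infer_instance

-- ===== CLAIM (what is proved, stated in full; the proofs are below) =====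
def Claim_equal_list_sizes : Prop := ∀ (length : Int) (min_length : Int) (max_length : Int), Dom_list_sizes length min_length max_length → Pre_list_sizes length min_length max_length → Spec_list_sizes length min_length max_length (list_sizes length min_length max_length)

-- ===== LEMMAS AND PROOFS =====

-- the effective upper bound on the number of factors, as both ports compute it
def maxE (fs : List Int) (mx : Int) : Int := if mx == -1 then (fs.length : Int) + 1 else mx

theorem maxE_def (fs : List Int) (mx : Int) :
    maxE fs mx = if mx == -1 then (fs.length : Int) + 1 else mx := rfl

-- the common characterisation of both outputs' members
def GoodList (D : List Int) (target mn mx : Int) (l : List Int) : Prop :=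
  l.Pairwise (· ≤ ·) ∧ (∀ x ∈ l, x ∈ D) ∧ l.prod = target ∧
    mn ≤ (l.length : Int) ∧ (l.length : Int) ≤ mx

-- the characterisation of altGo's output members
def BExt (ds : List Int) (rem minL maxL : Int) (pre l : List Int) : Prop :=
  ∃ ext : List Int, l = pre ++ ext ∧ ext.Pairwise (· ≤ ·) ∧ (∀ x ∈ ext, x ∈ ds) ∧
    ext.prod = rem ∧ minL ≤ (pre.length : Int) + ext.length ∧
    (pre.length : Int) + ext.length ≤ maxL

-- ---- generic small lemmas ----

theorem one_le_prod_int : ∀ {l : List Int}, (∀ x ∈ l, 1 ≤ x) → 1 ≤ l.prod := by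
  intro l
  induction l with
  | nil => intro _; simp
  | cons x t ih =>
    intro h
    have hx : 1 ≤ x := h x (by simp)
    have ht : 1 ≤ t.prod := ih (fun y hy => h y (by simp [hy]))
    rw [List.prod_cons]; nlinarith

theorem eq_nil_of_prod_one {l : List Int} (h2 : ∀ x ∈ l, 2 ≤ x) (hp : l.prod = 1) : l = [] := by
  cases l with
  | nil => rfl
  | cons x t =>
    exfalso
    have hx : 2 ≤ x := h2 x (by simp)
    have ht : 1 ≤ t.prod := one_le_prod_int (fun y hy => by have := h2 y (by simp [hy]); omega)
    rw [List.prod_cons] at hp; nlinarith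

theorem pairwise_lt_sorted {α : Type} [LinearOrder α] (xs : List α) (h : xs.Nodup) :
    (PySem.List.sorted xs (fun x => x) false).Pairwise (· < ·) := by
  have hle := PySem.List.sorted_pairwise (α := α) xs (fun x => x)
  have hnd : (PySem.List.sorted xs (fun x => x) false).Nodup :=
    ((PySem.List.sorted_perm xs (fun x => x) false).nodup_iff).mpr h
  exact (hle.and hnd).imp (fun h => lt_of_le_of_ne h.1 h.2)

-- two DecidableLT instances give the same sorted list (proof irrelevance of Decidable)
theorem sorted_dec_congr {α κ : Type} [LT κ] (d₁ d₂ : DecidableLT κ) (xs : List α)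
    (key : α → κ) (rev : Bool) :
    @PySem.List.sorted α κ _ d₁ xs key rev = @PySem.List.sorted α κ _ d₂ xs key rev := by
  congr 1

theorem pairwise_lt_sorted_LL (xs : List (List Int)) (h : xs.Nodup) :
    (PySem.List.sorted xs (fun x => x) false).Pairwise (· < ·) := by
  rw [sorted_dec_congr _ (@LinearOrder.toDecidableLT (List Int) inferInstance) xs (fun x => x) false]
  exact pairwise_lt_sorted xs h

theorem append_cons_lt (pre : List Int) {a b : Int} (u v : List Int) (h : a < b) :
    pre ++ a :: u < pre ++ b :: v := by
  induction pre with
  | nil => exact (List.cons_lt_cons_iff).mpr (Or.inl h)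
  | cons p pre ih => exact (List.cons_lt_cons_iff).mpr (Or.inr ⟨rfl, ih⟩)

-- ---- the factor list ----

def factorStep (length : Int) (s : PySem.Set Int) (i : Int) : PySem.Set Int :=
  if PySem.Int.mod length i == 0 then
    PySem.Set.add (PySem.Set.add s i) (PySem.Int.floordiv length i)
  else s

def pyFactorSet (length : Int) : PySem.Set Int :=
  (PySem.List.pyRange 1 ((Nat.sqrt length.toNat : Int) + 1) 1).foldl (factorStep length)
    PySem.Set.empty

theorem pyFindFactors_eq (length : Int) :
    pyFindFactors length =
      PySem.List.sorted ((pyFactorSet length).filter (fun e => !(e == 1 || e == length)))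
        (fun x => x) false := rfl

theorem altDivisors_eq (length : Int) : altDivisors length = pyFindFactors length := rfl

theorem factorSet_aux_pos (length : Int) :
    ∀ (l : List Int) (s : PySem.Set Int), (∀ i ∈ l, 1 ≤ i ∧ i ≤ length) → (∀ x ∈ s, 1 ≤ x) →
      ∀ x ∈ l.foldl (factorStep length) s, 1 ≤ x := by
  intro l
  induction l with
  | nil => intro s _ hs; simpa using hs
  | cons i t ih =>
    intro s hl hs
    rw [List.foldl_cons]
    apply ih _ (fun j hj => hl j (by simp [hj]))
    intro x hx
    have hi : 1 ≤ i ∧ i ≤ length := hl i (by simp)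
    have hipos : (0 : Int) < i := by omega
    unfold factorStep at hx
    split_ifs at hx with hmod
    · rcases (PySem.Set.mem_add _ _ _).mp hx with hx' | hx'
      · rcases (PySem.Set.mem_add _ _ _).mp hx' with hx'' | hx''
        · exact hs x hx''
        · omega
      · subst hx'
        rw [PySem.Int.floordiv_eq_ediv_of_pos hipos, Int.le_ediv_iff_mul_le hipos]
        omega
    · exact hs x hx

theorem factorSet_aux_nodup (length : Int) :
    ∀ (l : List Int) (s : PySem.Set Int), s.Nodup → (l.foldl (factorStep length) s).Nodup := by
  intro l
  induction l with
  | nil => intro s hs; simpa using hs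
  | cons i t ih =>
    intro s hs
    rw [List.foldl_cons]
    apply ih
    unfold factorStep
    split_ifs with hmod
    · exact PySem.Set.nodup_add _ _ (PySem.Set.nodup_add _ _ hs)
    · exact hs

theorem factorSet_pos (length : Int) (h0 : 0 ≤ length) : ∀ x ∈ pyFactorSet length, 1 ≤ x := by
  apply factorSet_aux_pos
  · intro i hi
    rw [PySem.List.mem_pyRange_one] at hi
    have hsq : ((Nat.sqrt length.toNat : Nat) : Int) ≤ length := by
      calc ((Nat.sqrt length.toNat : Nat) : Int) ≤ (length.toNat : Int) := by
            exact_mod_cast Nat.sqrt_le_self length.toNat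
        _ = length := Int.toNat_of_nonneg h0
    omega
  · intro x hx; exact absurd hx List.not_mem_nil

theorem factorSet_nodup (length : Int) : (pyFactorSet length).Nodup :=
  factorSet_aux_nodup length _ _ List.nodup_nil

theorem findFactors_ge_two (length : Int) (h0 : 0 ≤ length) :
    ∀ x ∈ pyFindFactors length, 2 ≤ x := by
  intro x hx
  rw [pyFindFactors_eq, PySem.List.mem_sorted, List.mem_filter] at hx
  obtain ⟨hmem, hcond⟩ := hx
  have h1 : 1 ≤ x := factorSet_pos length h0 x hmem
  have : ¬ (x = 1) := by
    intro h; subst h; simp at hcond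
  omega

theorem findFactors_pairwise (length : Int) : (pyFindFactors length).Pairwise (· < ·) := by
  rw [pyFindFactors_eq]
  exact pairwise_lt_sorted _ ((factorSet_nodup length).filter _)

-- ---- A side: combinations ----

theorem mem_pyProductRepeat (fs : List Int) :
    ∀ (n : Nat) (c : List Int), c ∈ pyProductRepeat fs n ↔ c.length = n ∧ ∀ x ∈ c, x ∈ fs := by
  intro n
  induction n with
  | zero =>
    intro c
    simp only [pyProductRepeat, List.mem_singleton]
    constructor
    · rintro rfl; exact ⟨rfl, by simp⟩
    · rintro ⟨hl, _⟩; exact List.length_eq_zero_iff.mp hl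
  | succ n ih =>
    intro c
    simp only [pyProductRepeat, List.mem_flatMap, List.mem_map]
    constructor
    · rintro ⟨a, ha, c', hc', rfl⟩
      obtain ⟨hlen, hmem⟩ := (ih c').mp hc'
      refine ⟨by simp [hlen], ?_⟩
      intro x hx
      rcases List.mem_cons.mp hx with rfl | hx'
      · exact ha
      · exact hmem x hx'
    · rintro ⟨hlen, hmem⟩
      cases c with
      | nil => simp at hlen
      | cons a c' =>
        exact ⟨a, hmem a (by simp), c',
          (ih c').mpr ⟨by simpa using hlen, fun x hx => hmem x (by simp [hx])⟩, rfl⟩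

theorem pyEvaluateCombo_iff :
    ∀ (c : List Int) (gt p : Int), 1 ≤ p → (∀ x ∈ c, 1 ≤ x) →
      (pyEvaluateCombo c gt p = true ↔ p * c.prod = gt) := by
  intro c
  induction c with
  | nil =>
    intro gt p _ _
    simp [pyEvaluateCombo]
  | cons n rest ih =>
    intro gt p hp hc
    have hn : 1 ≤ n := hc n (by simp)
    have hrest : ∀ x ∈ rest, 1 ≤ x := fun x hx => hc x (by simp [hx])
    have hpn : 1 ≤ p * n := by nlinarith
    have hrp : 1 ≤ rest.prod := one_le_prod_int hrest
    simp only [pyEvaluateCombo, List.prod_cons]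
    split_ifs with hgt
    · simp only [false_iff]
      intro he; nlinarith
    · rw [ih gt (p * n) hpn hrest, ← mul_assoc]

def comboStep (target : Int) (result : PySem.Set (List Int)) (combo : List Int) :
    PySem.Set (List Int) :=
  if pyEvaluateCombo combo target 1 then
    PySem.Set.add result (PySem.List.sorted combo (fun x => x) false)
  else result

def rStep (fs : List Int) (target : Int) (result : PySem.Set (List Int)) (r : Int) :
    PySem.Set (List Int) :=
  (pyProductRepeat fs r.toNat).foldl (comboStep target) result

theorem pyFindCombinations_eq (fs : List Int) (target mn mx : Int) :
    pyFindCombinations fs target mn mx =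
      (PySem.List.pyRange mn (maxE fs mx + 1) 1).foldl (rStep fs target) PySem.Set.empty := rfl

theorem mem_inner (target : Int) :
    ∀ (cs : List (List Int)) (res : PySem.Set (List Int)) (l : List Int),
      (l ∈ cs.foldl (comboStep target) res) ↔
      l ∈ res ∨ ∃ c ∈ cs, pyEvaluateCombo c target 1 = true ∧
        l = PySem.List.sorted c (fun x => x) false := by
  intro cs
  induction cs with
  | nil => intro res l; simp
  | cons c cs ih =>
    intro res l
    rw [List.foldl_cons, ih]
    by_cases h : pyEvaluateCombo c target 1 = true
    · rw [show comboStep target res c = PySem.Set.add res (PySem.List.sorted c (fun x => x) false) from by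
        unfold comboStep; rw [if_pos h]]
      rw [PySem.Set.mem_add]
      constructor
      · rintro (⟨hr | he⟩ | ⟨c', hc', hev, hl⟩)
        · exact Or.inl hr
        · exact Or.inr ⟨c, by simp, h, he⟩
        · exact Or.inr ⟨c', by simp [hc'], hev, hl⟩
      · rintro (hr | ⟨c', hc', hev, hl⟩)
        · exact Or.inl (Or.inl hr)
        · rcases List.mem_cons.mp hc' with rfl | hc''
          · exact Or.inl (Or.inr hl)
          · exact Or.inr ⟨c', hc'', hev, hl⟩
    · rw [show comboStep target res c = res from by unfold comboStep; rw [if_neg h]]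
      constructor
      · rintro (hr | ⟨c', hc', hev, hl⟩)
        · exact Or.inl hr
        · exact Or.inr ⟨c', by simp [hc'], hev, hl⟩
      · rintro (hr | ⟨c', hc', hev, hl⟩)
        · exact Or.inl hr
        · rcases List.mem_cons.mp hc' with rfl | hc''
          · exact absurd hev h
          · exact Or.inr ⟨c', hc'', hev, hl⟩

theorem nodup_inner (target : Int) :
    ∀ (cs : List (List Int)) (res : PySem.Set (List Int)), res.Nodup →
      (cs.foldl (comboStep target) res).Nodup := by
  intro cs
  induction cs with
  | nil => intro res h; simpa using h
  | cons c cs ih =>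
    intro res h
    rw [List.foldl_cons]
    apply ih
    unfold comboStep
    split_ifs with hev
    · exact PySem.Set.nodup_add _ _ h
    · exact h

theorem mem_outer (fs : List Int) (target : Int) :
    ∀ (rs : List Int) (res : PySem.Set (List Int)) (l : List Int),
      (l ∈ rs.foldl (rStep fs target) res) ↔
      l ∈ res ∨ ∃ r ∈ rs, ∃ c ∈ pyProductRepeat fs r.toNat,
        pyEvaluateCombo c target 1 = true ∧ l = PySem.List.sorted c (fun x => x) false := by
  intro rs
  induction rs with
  | nil => intro res l; simp
  | cons r rs ih =>
    intro res l
    rw [List.foldl_cons, ih]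
    rw [show (rStep fs target res r) = (pyProductRepeat fs r.toNat).foldl (comboStep target) res from rfl]
    rw [mem_inner]
    constructor
    · rintro (⟨hr | ⟨c, hc, hev, hl⟩⟩ | ⟨r', hr', c, hc, hev, hl⟩)
      · exact Or.inl hr
      · exact Or.inr ⟨r, by simp, c, hc, hev, hl⟩
      · exact Or.inr ⟨r', by simp [hr'], c, hc, hev, hl⟩
    · rintro (hr | ⟨r', hr', c, hc, hev, hl⟩)
      · exact Or.inl (Or.inl hr)
      · rcases List.mem_cons.mp hr' with rfl | hr''
        · exact Or.inl (Or.inr ⟨c, hc, hev, hl⟩)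
        · exact Or.inr ⟨r', hr'', c, hc, hev, hl⟩

theorem nodup_outer (fs : List Int) (target : Int) :
    ∀ (rs : List Int) (res : PySem.Set (List Int)), res.Nodup →
      (rs.foldl (rStep fs target) res).Nodup := by
  intro rs
  induction rs with
  | nil => intro res h; simpa using h
  | cons r rs ih =>
    intro res h
    rw [List.foldl_cons]
    exact ih _ (nodup_inner target _ _ h)

theorem mem_pyFindCombinations (fs : List Int) (target mn mx : Int) (l : List Int) :
    l ∈ pyFindCombinations fs target mn mx ↔
      ∃ r ∈ PySem.List.pyRange mn (maxE fs mx + 1),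
        ∃ c ∈ pyProductRepeat fs r.toNat,
          pyEvaluateCombo c target 1 = true ∧ l = PySem.List.sorted c (fun x => x) false := by
  rw [pyFindCombinations_eq, mem_outer]
  simp [PySem.Set.empty]

theorem nodup_pyFindCombinations (fs : List Int) (target mn mx : Int) :
    (pyFindCombinations fs target mn mx).Nodup := by
  rw [pyFindCombinations_eq]
  exact nodup_outer fs target _ _ List.nodup_nil

-- ---- A side: full characterisation ----

theorem mem_list_sizes_char (length mn mx : Int) (h0 : 0 ≤ length) (hmn : 0 ≤ mn) (l : List Int) :
    l ∈ list_sizes length mn mx ↔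
      GoodList (pyFindFactors length) length mn (maxE (pyFindFactors length) mx) l := by
  simp only [list_sizes]
  rw [PySem.List.mem_sorted, mem_pyFindCombinations]
  constructor
  · rintro ⟨r, hr, c, hc, hev, rfl⟩
    rw [PySem.List.mem_pyRange_one] at hr
    obtain ⟨hlen, hmem⟩ := (mem_pyProductRepeat _ _ _).mp hc
    have hc1 : ∀ x ∈ c, 1 ≤ x := fun x hx => by
      have := findFactors_ge_two length h0 x (hmem x hx); omega
    have hprod : c.prod = length := by
      have h := (pyEvaluateCombo_iff c length 1 le_rfl hc1).mp hev
      omega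
    have hperm := PySem.List.sorted_perm c (fun x => x) false
    have hr0 : ((r.toNat : Nat) : Int) = r := Int.toNat_of_nonneg (by omega)
    refine ⟨?_, ?_, ?_, ?_, ?_⟩
    · simpa using PySem.List.sorted_pairwise (α := Int) c (fun x => x)
    · intro x hx; exact hmem x ((PySem.List.mem_sorted _ _ _ _).mp hx)
    · rw [hperm.prod_eq, hprod]
    · rw [PySem.List.length_sorted, hlen]; omega
    · rw [PySem.List.length_sorted, hlen]; omega
  · rintro ⟨hpw, hmem, hprod, hb1, hb2⟩
    have hc1 : ∀ x ∈ l, 1 ≤ x := fun x hx => by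
      have := findFactors_ge_two length h0 x (hmem x hx); omega
    refine ⟨(l.length : Int), ?_, l, ?_, ?_, ?_⟩
    · rw [PySem.List.mem_pyRange_one]; omega
    · rw [mem_pyProductRepeat]; exact ⟨by simp, hmem⟩
    · exact (pyEvaluateCombo_iff l length 1 le_rfl hc1).mpr (by rw [one_mul]; exact hprod)
    · rw [PySem.List.sorted_eq_self_of_pairwise l (fun x => x) (by simpa using hpw)]

theorem pairwise_list_sizes (length mn mx : Int) :
    (list_sizes length mn mx).Pairwise (· < ·) := by
  simp only [list_sizes]
  exact pairwise_lt_sorted_LL _ (nodup_pyFindCombinations _ _ _ _)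

theorem list_sizes_of_empty_range (length mn mx : Int)
    (h : maxE (pyFindFactors length) mx + 1 ≤ mn) : list_sizes length mn mx = [] := by
  simp only [list_sizes]
  rw [pyFindCombinations_eq, PySem.List.pyRange_one_eq_nil h, List.foldl_nil]
  exact (PySem.List.sorted_eq_nil_iff _ _ _).mpr rfl

theorem rStep_nil_zero (res : PySem.Set (List Int)) (r : Int) : rStep [] 0 res r = res := by
  unfold rStep
  cases hn : r.toNat with
  | zero => simp [pyProductRepeat, comboStep, pyEvaluateCombo]
  | succ n => simp [pyProductRepeat]

theorem outer_zero : ∀ (rs : List Int) (res : PySem.Set (List Int)),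
    rs.foldl (rStep [] 0) res = res := by
  intro rs
  induction rs with
  | nil => intro res; rfl
  | cons r rs ih => intro res; rw [List.foldl_cons, rStep_nil_zero, ih]

theorem list_sizes_zero (mn mx : Int) : list_sizes 0 mn mx = [] := by
  have hf : pyFindFactors 0 = [] := by decide
  simp only [list_sizes, hf]
  rw [pyFindCombinations_eq, outer_zero]
  exact (PySem.List.sorted_eq_nil_iff _ _ _).mpr rfl

-- ---- B side: unfolding equations ----

theorem altGo_rem_one (minL maxL : Int) (fuel : Nat) (pre ds : List Int) (rem : Int)
    (h : rem = 1) :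
    altGo minL maxL fuel pre ds rem =
      if minL ≤ (pre.length : Int) ∧ (pre.length : Int) ≤ maxL then [pre] else [] := by
  subst h; rw [altGo.eq_def]; rfl

theorem altGo_fuel_zero (minL maxL : Int) (pre ds : List Int) (rem : Int) (h : rem ≠ 1) :
    altGo minL maxL 0 pre ds rem = [] := by
  rw [altGo.eq_def, if_neg (by simpa using h)]

theorem altGo_succ (minL maxL : Int) (f : Nat) (pre ds : List Int) (rem : Int) (h : rem ≠ 1) :
    altGo minL maxL (f + 1) pre ds rem =
      if (pre.length : Int) < maxL then altLoop minL maxL f pre ds rem else [] := by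
  rw [altGo.eq_def, if_neg (by simpa using h)]

theorem altLoop_nil (minL maxL : Int) (fuel : Nat) (pre : List Int) (rem : Int) :
    altLoop minL maxL fuel pre [] rem = [] := by
  rw [altLoop.eq_def]

theorem altLoop_cons (minL maxL : Int) (fuel : Nat) (pre : List Int) (d : Int)
    (rest : List Int) (rem : Int) :
    altLoop minL maxL fuel pre (d :: rest) rem =
      (if PySem.Int.mod rem d == 0 then
         altGo minL maxL fuel (pre ++ [d]) (d :: rest) (PySem.Int.floordiv rem d)
       else []) ++ altLoop minL maxL fuel pre rest rem := by
  rw [altLoop.eq_def]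

-- ---- B side: remaining = 0 gives no output ----

theorem altGo_rem_zero (minL maxL : Int) :
    ∀ (fuel : Nat) (pre ds : List Int), (∀ x ∈ ds, 2 ≤ x) →
      altGo minL maxL fuel pre ds 0 = [] := by
  intro fuel
  induction fuel with
  | zero => intro pre ds _; exact altGo_fuel_zero _ _ _ _ _ (by norm_num)
  | succ f ih =>
    intro pre ds h2
    rw [altGo_succ _ _ _ _ _ _ (by norm_num)]
    split_ifs with hlt
    · clear hlt
      induction ds with
      | nil => exact altLoop_nil _ _ _ _ _
      | cons d rest ihds =>
        have hd2 : 2 ≤ d := h2 d (by simp)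
        rw [altLoop_cons]
        have hdvd : (PySem.Int.mod (0 : Int) d == 0) = true := by
          simp [(PySem.Int.mod_eq_zero_iff_dvd 0 d).mpr (dvd_zero d)]
        rw [if_pos hdvd]
        have hfd : PySem.Int.floordiv 0 d = 0 := by
          rw [PySem.Int.floordiv_eq_ediv_of_pos (by omega)]; simp
        rw [hfd, ih _ _ h2, ihds (fun x hx => h2 x (by simp [hx]))]
        rfl
    · rfl

-- ---- B side: membership characterisation ----

theorem altLoop_mem (minL maxL : Int) (fuel : Nat)
    (hgo : ∀ (pre ds : List Int) (rem : Int), ds.Pairwise (· < ·) → (∀ x ∈ ds, 2 ≤ x) →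
      1 ≤ rem → rem.toNat + ds.length + 1 ≤ fuel →
      ∀ l, l ∈ altGo minL maxL fuel pre ds rem ↔ BExt ds rem minL maxL pre l) :
    ∀ (ds pre : List Int) (rem : Int), ds.Pairwise (· < ·) → (∀ x ∈ ds, 2 ≤ x) →
      2 ≤ rem → rem.toNat + ds.length ≤ fuel →
      ∀ l, l ∈ altLoop minL maxL fuel pre ds rem ↔ BExt ds rem minL maxL pre l := by
  intro ds
  induction ds with
  | nil =>
    intro pre rem _ _ hrem _ l
    rw [altLoop_nil]
    simp only [List.not_mem_nil, false_iff]
    rintro ⟨ext, rfl, _, hmem, hprod, _, _⟩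
    cases ext with
    | nil => simp at hprod; omega
    | cons e t => exact absurd (hmem e (by simp)) List.not_mem_nil
  | cons d rest ih =>
    intro pre rem hds h2 hrem hfuel l
    have hd2 : 2 ≤ d := h2 d (by simp)
    have hdpos : (0 : Int) < d := by omega
    have hdrest : ∀ x ∈ rest, d < x := (List.pairwise_cons.mp hds).1
    have hrest_pw : rest.Pairwise (· < ·) := (List.pairwise_cons.mp hds).2
    have hrest2 : ∀ x ∈ rest, 2 ≤ x := fun x hx => h2 x (by simp [hx])
    have hfuel' : rem.toNat + rest.length ≤ fuel := by
      simp only [List.length_cons] at hfuel; omega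
    have hdle : ∀ x ∈ (d :: rest), d ≤ x := by
      intro x hx
      rcases List.mem_cons.mp hx with rfl | hx'
      · exact le_rfl
      · exact le_of_lt (hdrest x hx')
    rw [altLoop_cons]
    by_cases hdvd : d ∣ rem
    · have hmodz : (PySem.Int.mod rem d == 0) = true := by
        simp [(PySem.Int.mod_eq_zero_iff_dvd rem d).mpr hdvd]
      rw [if_pos hmodz]
      have hfd : PySem.Int.floordiv rem d = rem / d := PySem.Int.floordiv_eq_ediv_of_pos hdpos
      have hdle' : d ≤ rem := Int.le_of_dvd (by omega) hdvd
      have hq1 : 1 ≤ rem / d := by rw [Int.le_ediv_iff_mul_le hdpos]; omega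
      have hqmul : rem / d * d = rem := Int.ediv_mul_cancel hdvd
      have hqlt : rem / d < rem := by nlinarith
      have hfuelgo : (rem / d).toNat + (d :: rest).length + 1 ≤ fuel := by
        simp only [List.length_cons] at hfuel ⊢; omega
      have hgo1 := hgo (pre ++ [d]) (d :: rest) (rem / d) hds h2 hq1 hfuelgo
      rw [hfd]
      constructor
      · intro hl
        rcases List.mem_append.mp hl with h1 | h1
        · rcases (hgo1 l).mp h1 with ⟨ext1, rfl, hpw1, hmem1, hprod1, hb11, hb12⟩
          refine ⟨d :: ext1, by simp, ?_, ?_, ?_, ?_, ?_⟩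
          · exact List.pairwise_cons.mpr ⟨fun x hx => hdle x (hmem1 x hx), hpw1⟩
          · intro x hx
            rcases List.mem_cons.mp hx with rfl | hx'
            · simp
            · exact hmem1 x hx'
          · rw [List.prod_cons, hprod1, mul_comm, hqmul]
          · simp only [List.length_append, List.length_cons, List.length_nil] at hb11 ⊢
            push_cast at hb11 ⊢; omega
          · simp only [List.length_append, List.length_cons, List.length_nil] at hb12 ⊢
            push_cast at hb12 ⊢; omega
        · rcases (ih pre rem hrest_pw hrest2 hrem hfuel' l).mp h1 with
            ⟨ext2, rfl, hpw2, hmem2, hprod2, hb21, hb22⟩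
          exact ⟨ext2, rfl, hpw2, fun x hx => by simp [hmem2 x hx], hprod2, hb21, hb22⟩
      · rintro ⟨ext, rfl, hpw, hmem, hprod, hb1, hb2⟩
        by_cases hall : ∀ x ∈ ext, x ∈ rest
        · exact List.mem_append.mpr (Or.inr
            ((ih pre rem hrest_pw hrest2 hrem hfuel' _).mpr
              ⟨ext, rfl, hpw, hall, hprod, hb1, hb2⟩))
        · push_neg at hall
          obtain ⟨y, hy, hynr⟩ := hall
          have hdin : d ∈ ext := by
            rcases List.mem_cons.mp (hmem y hy) with h | h
            · rwa [h] at hy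
            · exact absurd h hynr
          cases ext with
          | nil => exact absurd hdin List.not_mem_nil
          | cons e t =>
            have hed : e = d := by
              have hA : d ≤ e := hdle e (hmem e (by simp))
              have hB : e ≤ d := by
                rcases List.mem_cons.mp hdin with h | h
                · omega
                · exact (List.pairwise_cons.mp hpw).1 d h
              omega
            subst hed
            have htprod : t.prod = rem / e := by
              rw [List.prod_cons] at hprod
              rw [← hprod, Int.mul_ediv_cancel_left _ (by omega : e ≠ 0)]
            refine List.mem_append.mpr (Or.inl ((hgo1 _).mpr
              ⟨t, by simp, (List.pairwise_cons.mp hpw).2,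
               fun x hx => hmem x (by simp [hx]), htprod, ?_, ?_⟩))
            · simp only [List.length_append, List.length_cons, List.length_nil] at hb1 ⊢
              push_cast at hb1 ⊢; omega
            · simp only [List.length_append, List.length_cons, List.length_nil] at hb2 ⊢
              push_cast at hb2 ⊢; omega
    · have hmodz : (PySem.Int.mod rem d == 0) = false := by
        rw [beq_eq_false_iff_ne]
        intro h
        exact hdvd ((PySem.Int.mod_eq_zero_iff_dvd rem d).mp h)
      rw [if_neg (by simp [hmodz]), List.nil_append,
        ih pre rem hrest_pw hrest2 hrem hfuel' l]
      constructor
      · rintro ⟨ext, rfl, hpw, hmem, hprod, hb1, hb2⟩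
        exact ⟨ext, rfl, hpw, fun x hx => by simp [hmem x hx], hprod, hb1, hb2⟩
      · rintro ⟨ext, rfl, hpw, hmem, hprod, hb1, hb2⟩
        have hall : ∀ x ∈ ext, x ∈ rest := by
          intro x hx
          rcases List.mem_cons.mp (hmem x hx) with rfl | h
          · exfalso; exact hdvd (hprod ▸ List.dvd_prod hx)
          · exact h
        exact ⟨ext, rfl, hpw, hall, hprod, hb1, hb2⟩

theorem altGo_mem (minL maxL : Int) :
    ∀ (fuel : Nat) (pre ds : List Int) (rem : Int), ds.Pairwise (· < ·) →
      (∀ x ∈ ds, 2 ≤ x) → 1 ≤ rem → rem.toNat + ds.length + 1 ≤ fuel →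
      ∀ l, l ∈ altGo minL maxL fuel pre ds rem ↔ BExt ds rem minL maxL pre l := by
  intro fuel
  induction fuel with
  | zero => intro pre ds rem _ _ hrem hfuel; omega
  | succ f ih =>
    intro pre ds rem hds h2 hrem hfuel l
    by_cases h1 : rem = 1
    · subst h1
      rw [altGo_rem_one _ _ _ _ _ _ rfl]
      have hext_nil : ∀ ext : List Int, (∀ x ∈ ext, x ∈ ds) → ext.prod = 1 → ext = [] :=
        fun ext hmem hprod => eq_nil_of_prod_one (fun x hx => h2 x (hmem x hx)) hprod
      split_ifs with hcond
      · simp only [List.mem_singleton]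
        constructor
        · rintro rfl
          exact ⟨[], by simp, by simp, by simp, by simp,
            by simpa using hcond.1, by simpa using hcond.2⟩
        · rintro ⟨ext, rfl, _, hmem, hprod, _, _⟩
          rw [hext_nil ext hmem hprod, List.append_nil]
      · simp only [List.not_mem_nil, false_iff]
        rintro ⟨ext, rfl, _, hmem, hprod, hb1, hb2⟩
        rw [hext_nil ext hmem hprod] at hb1 hb2
        simp only [List.length_nil] at hb1 hb2
        push_cast at hb1 hb2
        exact hcond ⟨by omega, by omega⟩
    · have hrem2 : 2 ≤ rem := by omega
      rw [altGo_succ _ _ _ _ _ _ h1]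
      split_ifs with hlt
      · exact altLoop_mem minL maxL f ih ds pre rem hds h2 hrem2 (by omega) l
      · simp only [List.not_mem_nil, false_iff]
        rintro ⟨ext, rfl, _, hmem, hprod, hb1, hb2⟩
        cases ext with
        | nil => simp at hprod; omega
        | cons e t =>
          push_neg at hlt
          simp only [List.length_cons] at hb2
          push_cast at hb2
          omega

-- ---- B side: outputs are strictly increasing ----

theorem altLoop_pairwise (minL maxL : Int) (fuel : Nat)
    (hgoP : ∀ (pre ds : List Int) (rem : Int), ds.Pairwise (· < ·) → (∀ x ∈ ds, 2 ≤ x) →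
      1 ≤ rem → rem.toNat + ds.length + 1 ≤ fuel →
      (altGo minL maxL fuel pre ds rem).Pairwise (· < ·)) :
    ∀ (ds pre : List Int) (rem : Int), ds.Pairwise (· < ·) → (∀ x ∈ ds, 2 ≤ x) →
      2 ≤ rem → rem.toNat + ds.length ≤ fuel →
      (altLoop minL maxL fuel pre ds rem).Pairwise (· < ·) := by
  intro ds
  induction ds with
  | nil => intro pre rem _ _ _ _; rw [altLoop_nil]; exact List.Pairwise.nil
  | cons d rest ih =>
    intro pre rem hds h2 hrem hfuel
    have hd2 : 2 ≤ d := h2 d (by simp)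
    have hdpos : (0 : Int) < d := by omega
    have hdrest : ∀ x ∈ rest, d < x := (List.pairwise_cons.mp hds).1
    have hrest_pw : rest.Pairwise (· < ·) := (List.pairwise_cons.mp hds).2
    have hrest2 : ∀ x ∈ rest, 2 ≤ x := fun x hx => h2 x (by simp [hx])
    have hfuel' : rem.toNat + rest.length ≤ fuel := by
      simp only [List.length_cons] at hfuel; omega
    rw [altLoop_cons, List.pairwise_append]
    refine ⟨?_, ih pre rem hrest_pw hrest2 hrem hfuel', ?_⟩
    · by_cases hdvd : d ∣ rem
      · have hmodz : (PySem.Int.mod rem d == 0) = true := by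
          simp [(PySem.Int.mod_eq_zero_iff_dvd rem d).mpr hdvd]
        rw [if_pos hmodz]
        have hfd : PySem.Int.floordiv rem d = rem / d :=
          PySem.Int.floordiv_eq_ediv_of_pos hdpos
        have hdle' : d ≤ rem := Int.le_of_dvd (by omega) hdvd
        have hq1 : 1 ≤ rem / d := by rw [Int.le_ediv_iff_mul_le hdpos]; omega
        rw [hfd]
        exact hgoP (pre ++ [d]) (d :: rest) (rem / d) hds h2 hq1
          (by
            have hqmul : rem / d * d = rem := Int.ediv_mul_cancel hdvd
            have hqlt : rem / d < rem := by nlinarith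
            simp only [List.length_cons] at hfuel ⊢; omega)
      · have hmodz : (PySem.Int.mod rem d == 0) = false := by
          rw [beq_eq_false_iff_ne]
          intro h
          exact hdvd ((PySem.Int.mod_eq_zero_iff_dvd rem d).mp h)
        rw [if_neg (by simp [hmodz])]
        exact List.Pairwise.nil
    · intro l hl l' hl'
      by_cases hdvd : d ∣ rem
      · have hmodz : (PySem.Int.mod rem d == 0) = true := by
          simp [(PySem.Int.mod_eq_zero_iff_dvd rem d).mpr hdvd]
        rw [if_pos hmodz] at hl
        have hfd : PySem.Int.floordiv rem d = rem / d :=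
          PySem.Int.floordiv_eq_ediv_of_pos hdpos
        have hdle' : d ≤ rem := Int.le_of_dvd (by omega) hdvd
        have hq1 : 1 ≤ rem / d := by rw [Int.le_ediv_iff_mul_le hdpos]; omega
        have hqmul : rem / d * d = rem := Int.ediv_mul_cancel hdvd
        have hqlt : rem / d < rem := by nlinarith
        rw [hfd] at hl
        obtain ⟨ext1, hleq, _, _, _, _, _⟩ :=
          (altGo_mem minL maxL fuel (pre ++ [d]) (d :: rest) (rem / d) hds h2 hq1
            (by simp only [List.length_cons] at hfuel ⊢; omega) l).mp hl
        obtain ⟨ext2, hleq', _, hmem2, hprod2, _, _⟩ :=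
          (altLoop_mem minL maxL fuel (altGo_mem minL maxL fuel) rest pre rem hrest_pw
            hrest2 hrem hfuel' l').mp hl'
        cases ext2 with
        | nil =>
          exfalso; simp at hprod2; omega
        | cons e t =>
          have hde : d < e := hdrest e (hmem2 e (by simp))
          rw [hleq, hleq', List.append_assoc, List.singleton_append]
          exact append_cons_lt pre _ _ hde
      · have hmodz : (PySem.Int.mod rem d == 0) = false := by
          rw [beq_eq_false_iff_ne]
          intro h
          exact hdvd ((PySem.Int.mod_eq_zero_iff_dvd rem d).mp h)
        rw [if_neg (by simp [hmodz])] at hl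
        exact absurd hl List.not_mem_nil

theorem altGo_pairwise (minL maxL : Int) :
    ∀ (fuel : Nat) (pre ds : List Int) (rem : Int), ds.Pairwise (· < ·) →
      (∀ x ∈ ds, 2 ≤ x) → 1 ≤ rem → rem.toNat + ds.length + 1 ≤ fuel →
      (altGo minL maxL fuel pre ds rem).Pairwise (· < ·) := by
  intro fuel
  induction fuel with
  | zero => intro pre ds rem _ _ hrem hfuel; omega
  | succ f ih =>
    intro pre ds rem hds h2 hrem hfuel
    by_cases h1 : rem = 1
    · rw [altGo_rem_one _ _ _ _ _ _ h1]
      split_ifs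
      · exact List.pairwise_singleton _ _
      · exact List.Pairwise.nil
    · rw [altGo_succ _ _ _ _ _ _ h1]
      split_ifs with hlt
      · exact altLoop_pairwise minL maxL f ih ds pre rem hds h2 (by omega) (by omega)
      · exact List.Pairwise.nil

-- ---- B side: full characterisation ----

theorem mem_list_sizes_alt_char (length mn mx : Int) (h1 : 1 ≤ length) (l : List Int) :
    l ∈ list_sizes_alt length mn mx ↔
      GoodList (pyFindFactors length) length mn (maxE (pyFindFactors length) mx) l := by
  simp only [list_sizes_alt, altDivisors_eq, ← maxE_def]
  rw [altGo_mem mn (maxE (pyFindFactors length) mx) _ [] (pyFindFactors length) length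
    (findFactors_pairwise length) (findFactors_ge_two length (by omega)) h1 (by omega) l]
  constructor
  · rintro ⟨ext, rfl, hpw, hmem, hprod, hb1, hb2⟩
    exact ⟨hpw, hmem, hprod, by simpa using hb1, by simpa using hb2⟩
  · rintro ⟨hpw, hmem, hprod, hb1, hb2⟩
    exact ⟨l, by simp, hpw, hmem, hprod, by simpa using hb1, by simpa using hb2⟩

theorem pairwise_list_sizes_alt (length mn mx : Int) (h1 : 1 ≤ length) :
    (list_sizes_alt length mn mx).Pairwise (· < ·) := by
  simp only [list_sizes_alt, altDivisors_eq]
  exact altGo_pairwise _ _ _ _ _ _ (findFactors_pairwise length)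
    (findFactors_ge_two length (by omega)) h1 (by omega)

theorem list_sizes_alt_zero (mn mx : Int) : list_sizes_alt 0 mn mx = [] := by
  have hd : altDivisors 0 = [] := by decide
  simp only [list_sizes_alt]
  rw [altGo_rem_zero]
  intro x hx
  rw [hd] at hx
  exact absurd hx List.not_mem_nil

-- ---- assembly ----

theorem list_sizes_spec : Claim_equal_list_sizes := by
  intro length mn mx hDom hPre
  unfold Spec_list_sizes
  obtain ⟨h0, hPre2⟩ := hPre
  rcases eq_or_lt_of_le h0 with hz | hpos
  · rw [← hz, list_sizes_zero, list_sizes_alt_zero]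
  · have h1 : 1 ≤ length := hpos
    have hA := pairwise_list_sizes length mn mx
    have hB := pairwise_list_sizes_alt length mn mx h1
    have hndA : (list_sizes length mn mx).Nodup := hA.imp (fun h => ne_of_lt h)
    have hndB : (list_sizes_alt length mn mx).Nodup := hB.imp (fun h => ne_of_lt h)
    rcases hPre2 with hmn | ⟨hne, hlt⟩
    · -- min_length ≥ 0: both lists are the strictly increasing enumeration of GoodList
      have hmemiff : ∀ l, l ∈ list_sizes length mn mx ↔ l ∈ list_sizes_alt length mn mx := by
        intro l
        rw [mem_list_sizes_char length mn mx h0 hmn l, mem_list_sizes_alt_char length mn mx h1 l]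
      have hperm := (List.perm_ext_iff_of_nodup hndA hndB).mpr hmemiff
      exact List.eq_of_perm_of_sorted
        (fun a b _ _ hab hba => absurd hba (lt_asymm hab)) hA hB hperm
    · -- empty range: A's loop runs zero times and B's bounds are unsatisfiable
      have hmaxE : maxE (pyFindFactors length) mx = mx := by
        rw [maxE_def, if_neg (by simpa using hne)]
      rw [list_sizes_of_empty_range length mn mx (by omega)]
      refine (List.eq_nil_iff_forall_not_mem.mpr ?_).symm
      intro l hl
      obtain ⟨_, _, _, hb1, hb2⟩ := (mem_list_sizes_alt_char length mn mx h1 l).mp hl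
      rw [hmaxE] at hb2
      omega
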